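-- pv_equiv track=rewrite | github.com/SomilKSharma/AdvancedDSA | Greedy/coin.py | solve
-- ===== SOURCE A (Python) =====
-- def solve(A):
--
--     #find the max value of 5 power to use greedy
--     power=0
--     while A>=5**power:
--         power=power+1
--
--     #get the max value for greedy
--     power=power-1
--
--     #get the counter value
--     coins=0
--     while A:
--         #get coin for the value
--         coins=coins+A//5**power
--         #change power of A
--         A=A%5**power
--         #decrement power value
--         power=power-1
--
--     #return the value
--     return coins
-- ===== SOURCE B (Python) =====
-- def solve(A):
--     # sum of base-5 digits: one low-to-high loop, no power search, no exponentiation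
--     coins = 0
--     while A:
--         coins += A % 5
--         A //= 5
--     return coins
-- ===== Notes on version B (the rewrite author's own statement) =====
-- stated objective: simpler
-- what changed: Replaces the upward scan for the largest power of 5 plus high-to-low greedy subtraction with a single low-to-high loop summing base-5 digits (A%5, A//=5), with no exponentiation at all.
-- outside the precondition, e.g. on solve(-3): A returns 882.0, B does not finish within the time limit
import Mathlib
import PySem

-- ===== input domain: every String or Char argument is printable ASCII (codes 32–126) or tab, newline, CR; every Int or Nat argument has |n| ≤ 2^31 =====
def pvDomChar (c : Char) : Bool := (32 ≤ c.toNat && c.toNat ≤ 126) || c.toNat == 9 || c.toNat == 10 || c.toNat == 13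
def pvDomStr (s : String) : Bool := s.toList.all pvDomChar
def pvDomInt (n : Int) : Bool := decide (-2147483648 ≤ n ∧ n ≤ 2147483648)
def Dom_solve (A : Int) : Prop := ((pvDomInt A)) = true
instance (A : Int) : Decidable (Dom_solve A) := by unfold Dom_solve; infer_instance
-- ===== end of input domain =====

-- B replaces the upward power-of-5 scan + high-to-low greedy subtraction with one
-- low-to-high loop summing base-5 digits (A%5, A//=5); objective: simpler.

-- ===== PORT A =====
-- Python's 5**power; inside Pre_ (0 ≤ A) every evaluated exponent is ≥ 0, where 5^p.toNat is exact
-- (negative exponents are only reached on inputs excluded by Pre_, where Python drifts into floats).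
def pvPow5 (p : Int) : Int := 5 ^ p.toNat

-- 'while A >= 5**power: power += 1'  (fuel only makes the loop total; ample inside Pre_)
def pvLoop1 (fuel : Nat) (A : Int) (power : Int) : Int :=
  match fuel with
  | 0 => power
  | fuel + 1 => if pvPow5 power ≤ A then pvLoop1 fuel A (power + 1) else power

-- 'while A: coins += A // 5**power; A %= 5**power; power -= 1'
def pvLoop2 (fuel : Nat) (A : Int) (power : Int) (coins : Int) : Int :=
  match fuel with
  | 0 => coins
  | fuel + 1 =>
    if A ≠ 0 then
      pvLoop2 fuel (PySem.Int.mod A (pvPow5 power)) (power - 1)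
        (coins + PySem.Int.floordiv A (pvPow5 power))
    else coins

def solve (A : Int) : Int :=
  let power := pvLoop1 (A.toNat + 2) A 0
  pvLoop2 (A.toNat + 2) A (power - 1) 0

-- ===== PORT B =====
-- 'while A: coins += A % 5; A //= 5'
def pvDigitLoop (fuel : Nat) (A : Int) (coins : Int) : Int :=
  match fuel with
  | 0 => coins
  | fuel + 1 =>
    if A ≠ 0 then pvDigitLoop fuel (PySem.Int.floordiv A 5) (coins + PySem.Int.mod A 5)
    else coins

def solve_alt (A : Int) : Int := pvDigitLoop (A.toNat + 1) A 0

-- ===== PRECONDITION & SPEC =====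
-- Pre_ excludes negative A: there Python A leaves integer arithmetic (5**negative is a float)
-- and returns a float, not an int (e.g. solve(-3) = 882.0), while B's loop does not terminate.
def Pre_solve (A : Int) : Prop := 0 ≤ A
instance (A : Int) : Decidable (Pre_solve A) := by unfold Pre_solve; infer_instance
def pvWitness_solve : Int := (26)
def Spec_solve (A : Int) (out : Int) : Prop := out = solve_alt A
instance (A : Int) (out : Int) : Decidable (Spec_solve A out) := by unfold Spec_solve; infer_instance

-- ===== CLAIM (what is proved, stated in full; the proofs are below) =====
def Claim_equal_solve : Prop := ∀ (A : Int), Dom_solve A → Pre_solve A → Spec_solve A (solve A)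

-- ===== LEMMAS AND PROOFS =====

-- sum of base-5 digits
def pvS (n : Nat) : Nat :=
  if h : n = 0 then 0 else n % 5 + pvS (n / 5)
decreasing_by exact Nat.div_lt_self (Nat.pos_of_ne_zero h) (by norm_num)

theorem pvS_zero : pvS 0 = 0 := by simp [pvS]
theorem pvS_pos (n : Nat) (h : n ≠ 0) : pvS n = n % 5 + pvS (n / 5) := by
  rw [pvS]; simp [h]

theorem pv_lt_pow5 (n : Nat) : n < 5 ^ n :=
  Nat.lt_pow_self (by norm_num)

theorem pv_cast_floordiv (n k : Nat) :
    PySem.Int.floordiv (n : Int) ((k : Nat) : Int) = ((n / k : Nat) : Int) :=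
  PySem.Int.floordiv_natCast n k

theorem pv_cast_mod (n k : Nat) :
    PySem.Int.mod (n : Int) ((k : Nat) : Int) = ((n % k : Nat) : Int) :=
  PySem.Int.mod_natCast n k

-- digit decomposition at the top power
theorem pvS_split (p : Nat) : ∀ n : Nat, n < 5 ^ (p + 1) → pvS n = n / 5 ^ p + pvS (n % 5 ^ p) := by
  induction p with
  | zero =>
    intro n hn
    simp only [pow_zero] at *
    rcases Nat.eq_zero_or_pos n with h | h
    · subst h; simp [pvS_zero]
    · have hn5 : n < 5 := by simpa using hn
      rw [pvS_pos n (by omega)]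
      simp [Nat.mod_one, Nat.div_one, pvS_zero, Nat.mod_eq_of_lt hn5, Nat.div_eq_of_lt hn5]
  | succ p ih =>
    intro n hn
    rcases Nat.eq_zero_or_pos n with h | h
    · subst h; simp [pvS_zero]
    · have h5 : n / 5 < 5 ^ (p + 1) := by
        have : 5 ^ (p + 1 + 1) = 5 ^ (p + 1) * 5 := by ring
        rw [this] at hn
        exact Nat.div_lt_of_lt_mul (by omega)
      have hdd : n / 5 / 5 ^ p = n / 5 ^ (p + 1) := by
        rw [Nat.div_div_eq_div_mul]; ring_nf
      have hm5 : n % 5 ^ (p + 1) % 5 = n % 5 := by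
        apply Nat.mod_mod_of_dvd
        exact dvd_pow_self 5 (by omega)
      have hmd : n % 5 ^ (p + 1) / 5 = n / 5 % 5 ^ p := by
        have : (5:Nat) ^ (p + 1) = 5 * 5 ^ p := by ring
        rw [this, Nat.mod_mul_right_div_self]
      rw [pvS_pos n (by omega), ih (n / 5) h5, hdd]
      rcases Nat.eq_zero_or_pos (n % 5 ^ (p + 1)) with hz | hz
      · have h1 : n % 5 = 0 := by rw [← hm5, hz]
        have h2 : n / 5 % 5 ^ p = 0 := by rw [← hmd, hz]
        rw [hz, h1, h2, pvS_zero]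
        omega
      · rw [pvS_pos (n % 5 ^ (p + 1)) (by omega), hm5, hmd]
        omega

theorem pvLoop2_zero (f : Nat) (p c : Int) : pvLoop2 f 0 p c = c := by
  cases f <;> simp [pvLoop2]

theorem pvPow5_natCast (k : Nat) : pvPow5 ((k : Nat) : Int) = ((5 ^ k : Nat) : Int) := by
  simp [pvPow5]

theorem pvLoop2_eq (k : Nat) :
    ∀ (fuel : Nat) (n : Nat) (coins : Int), n < 5 ^ (k + 1) → k < fuel →
      pvLoop2 fuel (n : Int) (k : Int) coins = coins + (pvS n : Int) := by
  induction k with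
  | zero =>
    intro fuel n coins hn hf
    obtain ⟨f, rfl⟩ : ∃ f, fuel = f + 1 := ⟨fuel - 1, by omega⟩
    rcases Nat.eq_zero_or_pos n with h | h
    · subst h; simp [pvLoop2, pvS_zero]
    · have hne : (n : Int) ≠ 0 := Int.natCast_ne_zero.mpr (by omega)
      simp only [pvLoop2, hne, if_pos, ne_eq, not_false_eq_true]
      rw [pvPow5_natCast 0, pv_cast_mod n (5 ^ 0), pv_cast_floordiv n (5 ^ 0)]
      simp only [pow_zero, Nat.mod_one, Nat.div_one, Nat.cast_zero]
      rw [pvLoop2_zero]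
      rw [pvS_pos n (by omega), Nat.mod_eq_of_lt (by omega), Nat.div_eq_of_lt (by omega),
        pvS_zero]
      push_cast; ring
  | succ k ih =>
    intro fuel n coins hn hf
    obtain ⟨f, rfl⟩ : ∃ f, fuel = f + 1 := ⟨fuel - 1, by omega⟩
    rcases Nat.eq_zero_or_pos n with h | h
    · subst h; simp [pvLoop2, pvS_zero]
    · have hne : (n : Int) ≠ 0 := Int.natCast_ne_zero.mpr (by omega)
      simp only [pvLoop2, hne, ne_eq, not_false_eq_true, if_true]
      have hc : (((k + 1 : Nat) : Int)) - 1 = ((k : Nat) : Int) := by push_cast; ring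
      rw [pvPow5_natCast, pv_cast_mod, pv_cast_floordiv, hc]
      rw [ih f (n % 5 ^ (k + 1)) _ (Nat.mod_lt n (by positivity)) (by omega)]
      rw [pvS_split (k + 1) n hn]
      push_cast; ring

theorem pvLoop1_eq :
    ∀ (fuel power n : Nat), n < 5 ^ (power + fuel) →
      ∃ r : Nat, pvLoop1 fuel (n : Int) (power : Int) = (r : Int) ∧ power ≤ r ∧ n < 5 ^ r ∧
        (5 ^ power ≤ n → power < r) ∧ (r = power ∨ 5 ^ (r - 1) ≤ n) := by
  intro fuel
  induction fuel with
  | zero =>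
    intro power n hn
    rw [Nat.add_zero] at hn
    exact ⟨power, rfl, le_refl _, hn, by intro h; omega, Or.inl rfl⟩
  | succ fuel ih =>
    intro power n hn
    by_cases hcond : 5 ^ power ≤ n
    · have hcond' : pvPow5 ((power : Nat) : Int) ≤ (n : Int) := by
        rw [pvPow5_natCast]; exact_mod_cast hcond
      have hstep : ((power : Nat) : Int) + 1 = ((power + 1 : Nat) : Int) := by push_cast; ring
      have hn' : n < 5 ^ (power + 1 + fuel) := by
        have : power + 1 + fuel = power + (fuel + 1) := by omega
        rw [this]; exact hn
      obtain ⟨r, hr1, hr2, hr3, _, hr5⟩ := ih (power + 1) n hn'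
      refine ⟨r, ?_, by omega, hr3, by intro _; omega, ?_⟩
      · simp only [pvLoop1, hcond', if_pos, hstep]
        exact hr1
      · rcases hr5 with h | h
        · right; rw [h]; simpa using hcond
        · right; exact h
    · have hcond' : ¬ pvPow5 ((power : Nat) : Int) ≤ (n : Int) := by
        rw [pvPow5_natCast]; exact_mod_cast hcond
      refine ⟨power, ?_, le_refl _, by omega, by intro h; omega, Or.inl rfl⟩
      simp [pvLoop1, hcond']

theorem pvDigitLoop_eq :
    ∀ (fuel : Nat) (n : Nat) (coins : Int), n < 5 ^ fuel →
      pvDigitLoop fuel (n : Int) coins = coins + (pvS n : Int) := by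
  intro fuel
  induction fuel with
  | zero =>
    intro n coins hn
    interval_cases n
    simp [pvDigitLoop, pvS_zero]
  | succ fuel ih =>
    intro n coins hn
    rcases Nat.eq_zero_or_pos n with h | h
    · subst h; simp [pvDigitLoop, pvS_zero]
    · have hne : (n : Int) ≠ 0 := Int.natCast_ne_zero.mpr (by omega)
      simp only [pvDigitLoop, hne, ne_eq, not_false_eq_true, if_true]
      have h5 : (5 : Int) = ((5 : Nat) : Int) := by norm_num
      rw [h5, pv_cast_mod, pv_cast_floordiv]
      have hlt : n / 5 < 5 ^ fuel := by
        have : 5 ^ (fuel + 1) = 5 ^ fuel * 5 := by ring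
        rw [this] at hn
        exact Nat.div_lt_of_lt_mul (by omega)
      rw [ih (n / 5) _ hlt, pvS_pos n (by omega)]
      push_cast; ring

-- ===== VERDICT (by name: the statement is the Claim_ definition above) =====
theorem solve_spec : Claim_equal_solve := by
  intro A _ hpre
  unfold Spec_solve
  obtain ⟨n, rfl⟩ : ∃ n : Nat, A = (n : Int) := ⟨A.toNat, (Int.toNat_of_nonneg hpre).symm⟩
  have htn : ((n : Int)).toNat = n := Int.toNat_natCast n
  rcases Nat.eq_zero_or_pos n with h | h
  · subst h; decide
  · have hbig : n < 5 ^ (0 + (n + 2)) := by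
      calc n < 5 ^ n := pv_lt_pow5 n
      _ ≤ 5 ^ (0 + (n + 2)) := Nat.pow_le_pow_right (by norm_num) (by omega)
    obtain ⟨r, hr1, _, hr3, hr4, hr5⟩ := pvLoop1_eq (n + 2) 0 n hbig
    have hrpos : 0 < r := hr4 (by simpa using h)
    have hrle : r - 1 < n := by
      rcases hr5 with h' | h'
      · omega
      · have := pv_lt_pow5 (r - 1); omega
    unfold solve solve_alt
    rw [htn]
    show pvLoop2 (n + 2) (n : Int) (pvLoop1 (n + 2) (n : Int) 0 - 1) 0 = pvDigitLoop (n + 1) (n : Int) 0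
    have hr1' : pvLoop1 (n + 2) (n : Int) 0 = (r : Int) := by simpa using hr1
    rw [hr1']
    have hc : ((r : Nat) : Int) - 1 = ((r - 1 : Nat) : Int) := by push_cast [Nat.cast_sub hrpos]; ring
    rw [hc]
    have h31 : n < 5 ^ (r - 1 + 1) := by rw [Nat.sub_add_cancel hrpos]; exact hr3
    rw [pvLoop2_eq (r - 1) (n + 2) n 0 h31 (by omega)]
    rw [pvDigitLoop_eq (n + 1) n 0 (by calc n < 5 ^ n := pv_lt_pow5 n
          _ ≤ 5 ^ (n + 1) := Nat.pow_le_pow_right (by norm_num) (by omega))]
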